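-- pv_equiv track=rewrite | github.com/Binghankina/ESearchWithNLPKnowledgeGraph | rest_api/tools/table_process.py | split_tables
-- ===== SOURCE A (Python) =====
-- from collections import OrderedDict
--
-- def _itersplit(l, splitter, keep):
--     current = []
--     for row in l:
--         row_str = "".join(row)
--         if splitter in row_str.replace(" ",""):
--             yield current
--             if keep:
--                 current = []
--                 current.append(row)
--             else:
--                 current = []
--         else:
--             current.append(row)
--     yield current
--
-- def tablesplit(l, splitter, keep):
--     return [subl for subl in _itersplit(l, splitter, keep) if subl]
--
-- def split_tables(data, keyword, keep_keyword):
--     splited_list = []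
--     return_data = OrderedDict()
--     for t_k, t_v in data.items():
--         tables = tablesplit(t_v, keyword, keep_keyword)
--         splited_list.extend(tables)
--     for t_i in range(0, len(splited_list)):
--         return_data["table_t" + str(t_i+1)] = splited_list[t_i]
--     return return_data
-- ===== SOURCE B (Python) =====
-- from collections import OrderedDict
--
-- def split_tables(data, keyword, keep_keyword):
--     segments = []
--     for rows in data.values():
--         rows = list(rows)
--         hits = [i for i, row in enumerate(rows)
--                 if keyword in "".join(row).replace(" ", "")]
--         prev = 0
--         for h in hits:
--             segments.append(rows[prev:h])
--             prev = h if keep_keyword else h + 1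
--         segments.append(rows[prev:])
--     pieces = (s for s in segments if s)
--     return OrderedDict(("table_t" + str(i + 1), s) for i, s in enumerate(pieces))
-- ===== Notes on version B (the rewrite author's own statement) =====
-- stated objective: alternative
-- what changed: B replaces the row-by-row generator that accumulates a 'current' segment with an index-based pass: it collects the indices of matching rows and builds each segment as a slice between consecutive match indices (keeping or dropping the matching row via the slice start), then numbers the non-empty segments.
import Mathlib
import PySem

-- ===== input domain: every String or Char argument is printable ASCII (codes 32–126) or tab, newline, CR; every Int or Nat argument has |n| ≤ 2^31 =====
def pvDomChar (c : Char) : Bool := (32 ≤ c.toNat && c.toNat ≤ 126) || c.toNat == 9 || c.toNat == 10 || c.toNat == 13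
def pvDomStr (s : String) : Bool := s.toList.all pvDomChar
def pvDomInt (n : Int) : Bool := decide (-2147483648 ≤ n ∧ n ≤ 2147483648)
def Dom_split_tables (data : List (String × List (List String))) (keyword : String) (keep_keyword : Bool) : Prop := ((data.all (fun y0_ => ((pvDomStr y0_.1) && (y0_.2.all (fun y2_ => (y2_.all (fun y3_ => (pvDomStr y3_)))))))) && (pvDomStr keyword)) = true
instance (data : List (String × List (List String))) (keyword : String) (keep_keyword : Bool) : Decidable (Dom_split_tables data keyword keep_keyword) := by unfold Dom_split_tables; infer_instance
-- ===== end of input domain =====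

-- B rebuilds the split by collecting match indices and slicing the row list between them,
-- instead of A's generator that accumulates a 'current' segment row by row (objective: alternative decomposition).


-- ===== PORT A =====
-- the match test both Pythons perform on a row: keyword in "".join(row).replace(" ", "")
def pvMatch (keyword : String) (row : List String) : Bool :=
  PySem.Str.isIn keyword (PySem.Str.replace (PySem.Str.join "" row) " " "")

-- _itersplit: the generator, as a fold over the rows with state (current, yielded-so-far)
def pvItersplit (l : List (List String)) (splitter : String) (keep : Bool) :
    List (List (List String)) :=
  let st := l.foldl
    (fun (st : List (List String) × List (List (List String))) row =>
      if pvMatch splitter row then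
        ((if keep then [row] else []), st.2 ++ [st.1])
      else (st.1 ++ [row], st.2))
    ([], [])
  st.2 ++ [st.1]

-- tablesplit: keep the truthy (non-empty) sublists
def pvTablesplit (l : List (List String)) (splitter : String) (keep : Bool) :
    List (List (List String)) :=
  (pvItersplit l splitter keep).filter (fun s => !s.isEmpty)

def split_tables (data : List (String × List (List String))) (keyword : String) (keep_keyword : Bool) : List (String × List (List String)) :=
  let splited_list := data.foldl
    (fun acc p => acc ++ pvTablesplit p.2 keyword keep_keyword) []
  (((PySem.List.pyRange 0 (PySem.List.len splited_list) 1).foldl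
      (fun (d : PySem.Dict String (List (List String))) t_i =>
        d.insert ("table_t" ++ PySem.Int.toStr (t_i + 1))
          (PySem.List.pyGetD splited_list t_i []))
      PySem.Dict.empty) : PySem.Dict String (List (List String))).items

-- ===== PORT B =====
-- hits = [i for i, row in enumerate(rows) if keyword in "".join(row).replace(" ", "")]
def pvHits (rows : List (List String)) (keyword : String) : List Int :=
  (PySem.List.enumerate rows).filterMap
    (fun p => if pvMatch keyword p.2 then some p.1 else none)

-- the per-table body of B's outer loop: append the slices between match indices to segs
def pvSegsOf (segs : List (List (List String))) (rows : List (List String))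
    (keyword : String) (keep_keyword : Bool) : List (List (List String)) :=
  let st := (pvHits rows keyword).foldl
    (fun (st : Int × List (List (List String))) h =>
      ((if keep_keyword then h else h + 1),
       st.2 ++ [PySem.List.slice rows (some st.1) (some h)]))
    (0, segs)
  st.2 ++ [PySem.List.slice rows (some st.1) none]

def split_tables_alt (data : List (String × List (List String))) (keyword : String) (keep_keyword : Bool) : List (String × List (List String)) :=
  let segments := data.foldl (fun segs p => pvSegsOf segs p.2 keyword keep_keyword) []
  let pieces := segments.filter (fun s => !s.isEmpty)
  ((PySem.Dict.ofList
      ((PySem.List.enumerate pieces).map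
        (fun p => ("table_t" ++ PySem.Int.toStr (p.1 + 1), p.2)))) :
    PySem.Dict String (List (List String))).items

-- ===== PRECONDITION & SPEC =====
def Spec_split_tables (data : List (String × List (List String))) (keyword : String) (keep_keyword : Bool) (out : List (String × List (List String))) : Prop := out = split_tables_alt data keyword keep_keyword
instance (data : List (String × List (List String))) (keyword : String) (keep_keyword : Bool) (out : List (String × List (List String))) : Decidable (Spec_split_tables data keyword keep_keyword out) := by unfold Spec_split_tables; infer_instance

-- ===== CLAIM (what is proved, stated in full; the proofs are below) =====
def Claim_equal_split_tables : Prop := ∀ (data : List (String × List (List String))) (keyword : String) (keep_keyword : Bool), Dom_split_tables data keyword keep_keyword → Spec_split_tables data keyword keep_keyword (split_tables data keyword keep_keyword)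

-- ===== LEMMAS AND PROOFS =====

def genA (kw : String) (keep : Bool) (cur : List (List String)) :
    List (List String) → List (List (List String))
  | [] => [cur]
  | r :: rs =>
    if pvMatch kw r then cur :: genA kw keep (if keep then [r] else []) rs
    else genA kw keep (cur ++ [r]) rs

def hitsN (kw : String) : List (List String) → List Nat
  | [] => []
  | r :: rs => if pvMatch kw r then 0 :: (hitsN kw rs).map (· + 1) else (hitsN kw rs).map (· + 1)
def genB (kw : String) (keep : Bool) (hs : List Nat) (p : Nat)
    (segs : List (List (List String))) (rows : List (List String)) :
    List (List (List String)) :=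
  let st := hs.foldl
    (fun (st : Nat × List (List (List String))) h =>
      ((if keep then h else h + 1), st.2 ++ [(rows.drop st.1).take (h - st.1)]))
    (p, segs)
  st.2 ++ [rows.drop st.1]
theorem hits_eq_hitsN (kw : String) (rows : List (List String)) (s : Int) :
    (PySem.List.enumerate rows s).filterMap
      (fun p => if pvMatch kw p.2 then some p.1 else none)
      = (hitsN kw rows).map (fun k : Nat => s + k) := by
  induction rows generalizing s with
  | nil => rw [PySem.List.enumerate_nil]; rfl
  | cons r rs ih =>
    rw [PySem.List.enumerate_cons, List.filterMap_cons, ih (s+1)]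
    have hmap : ((hitsN kw rs).map (· + 1)).map (fun k : Nat => s + (k : Int))
        = (hitsN kw rs).map (fun k : Nat => (s + 1) + (k : Int)) := by
      rw [List.map_map]; apply List.map_congr_left; intro k _
      simp only [Function.comp_apply]; push_cast; ring
    cases hm : pvMatch kw r
    · simp only [hitsN, hm, if_neg, Bool.false_eq_true, not_false_iff, hmap]
    · simp only [hitsN, hm, if_pos, List.map_cons, hmap]
      norm_num

def intSegs (keep : Bool) (rows : List (List String)) (hs : List Int)
    (p : Int) (segs : List (List (List String))) : List (List (List String)) :=
  let st := hs.foldl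
    (fun (st : Int × List (List (List String))) h =>
      ((if keep then h else h + 1),
       st.2 ++ [PySem.List.slice rows (some st.1) (some h)]))
    (p, segs)
  st.2 ++ [PySem.List.slice rows (some st.1) none]

theorem segsOf_intSegs (segs : List (List (List String))) (rows : List (List String))
    (kw : String) (keep : Bool) :
    pvSegsOf segs rows kw keep = intSegs keep rows (pvHits rows kw) 0 segs := rfl

-- cast: the Int fold of pvSegsOf over Nat-cast hits is genB
theorem foldcast (kw : String) (keep : Bool) (rows : List (List String))
    (hs : List Nat) (p : Nat) (segs : List (List (List String))) :
    intSegs keep rows (hs.map (fun k : Nat => (k : Int))) (p : Int) segs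
      = genB kw keep hs p segs rows := by
  induction hs generalizing p segs with
  | nil =>
    simp only [List.map_nil, intSegs, List.foldl_nil, genB, PySem.List.slice_from_natCast]
  | cons h t ih =>
    simp only [List.map_cons, intSegs, List.foldl_cons, genB, PySem.List.slice_natCast]
    cases keep
    · simpa only [if_neg, Bool.false_eq_true, not_false_iff, intSegs, genB,
        (by push_cast; ring : ((h:Int) + 1) = ((h+1 : Nat) : Int))] using ih (h+1) _
    · simpa only [if_pos, intSegs, genB] using ih h _

theorem segsOf_eq_genB (kw : String) (keep : Bool) (rows : List (List String))
    (segs : List (List (List String))) :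
    pvSegsOf segs rows kw keep = genB kw keep (hitsN kw rows) 0 segs rows := by
  rw [segsOf_intSegs, pvHits, hits_eq_hitsN kw rows 0]
  have h0 := foldcast kw keep rows (hitsN kw rows) 0 segs
  simp only [Nat.cast_zero] at h0
  rw [← h0]
  congr 1
  apply List.map_congr_left; intro k _; simp
theorem genB_acc (kw : String) (keep : Bool) (hs : List Nat) (p : Nat)
    (segs : List (List (List String))) (rows : List (List String)) :
    genB kw keep hs p segs rows = segs ++ genB kw keep hs p [] rows := by
  induction hs generalizing p segs with
  | nil => simp [genB]
  | cons h t ih =>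
    simp only [genB, List.foldl_cons] at *
    rw [ih _ (segs ++ _), ih _ ([] ++ _)]
    simp

theorem genB_shift (kw : String) (keep : Bool) (hs : List Nat) (p : Nat)
    (segs : List (List (List String))) (r : List String) (rows : List (List String)) :
    genB kw keep (hs.map (· + 1)) (p + 1) segs (r :: rows) = genB kw keep hs p segs rows := by
  induction hs generalizing p segs with
  | nil => simp [genB]
  | cons h t ih =>
    simp only [List.map_cons, genB, List.foldl_cons] at *
    cases keep
    · simpa only [if_neg, Bool.false_eq_true, not_false_iff, List.drop_succ_cons,
        Nat.add_sub_add_right] using ih (h+1) _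
    · simpa only [if_pos, List.drop_succ_cons, Nat.add_sub_add_right] using ih h _

theorem genB_head (kw : String) (keep : Bool) (hs : List Nat)
    (segs : List (List (List String))) (r : List String) (rows : List (List String)) :
    genB kw keep (hs.map (· + 1)) 0 segs (r :: rows)
      = segs ++ (genB kw keep hs 0 [] rows).modifyHead (r :: ·) := by
  cases hs with
  | nil => simp [genB]
  | cons h t =>
    simp only [List.map_cons, genB, List.foldl_cons, List.drop_zero, Nat.sub_zero,
      List.take_succ_cons]
    have hstep : (if keep then h + 1 else h + 1 + 1) = (if keep then h else h + 1) + 1 := by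
      cases keep <;> simp
    rw [hstep]
    have := genB_shift kw keep t (if keep then h else h+1) (segs ++ [r :: rows.take h]) r rows
    simp only [genB, List.foldl_cons] at this ⊢
    rw [this]
    have h2 := genB_acc kw keep t (if keep then h else h+1) (segs ++ [r :: rows.take h]) rows
    have h3 := genB_acc kw keep t (if keep then h else h+1) ([rows.take h]) rows
    simp only [genB, List.nil_append] at h2 h3 ⊢
    rw [h2, h3]
    simp
theorem genA_modifyHead (kw : String) (keep : Bool) (cur : List (List String))
    (rows : List (List String)) :
    genA kw keep cur rows = (genA kw keep [] rows).modifyHead (cur ++ ·) := by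
  induction rows generalizing cur with
  | nil => simp [genA]
  | cons r rs ih =>
    simp only [genA]
    cases hm : pvMatch kw r
    · simp only [Bool.false_eq_true, if_neg, not_false_iff]
      rw [ih (cur ++ [r]), ih ([] ++ [r])]
      cases hg : genA kw keep [] rs <;> simp
    · simp only [if_pos]
      cases hg : genA kw keep (if keep then [r] else []) rs <;> simp

theorem genB_eq_genA (kw : String) (keep : Bool) (rows : List (List String))
    (segs : List (List (List String))) :
    genB kw keep (hitsN kw rows) 0 segs rows = segs ++ genA kw keep [] rows := by
  induction rows generalizing segs with
  | nil => simp [genB, hitsN, genA]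
  | cons r rs ih =>
    cases hm : pvMatch kw r
    · -- no match: hits shift, head segment gains r
      simp only [hitsN, hm, Bool.false_eq_true, if_neg, not_false_iff]
      rw [genB_head, ih []]
      simp only [List.nil_append, genA, hm, Bool.false_eq_true, if_neg, not_false_iff]
      rw [genA_modifyHead kw keep [r] rs]
      rfl
    · -- match: an empty segment is emitted, then continue (keeping r iff keep)
      simp only [hitsN, hm, if_pos, genA]
      show genB kw keep (0 :: (hitsN kw rs).map (· + 1)) 0 segs (r :: rs) = _
      simp only [genB, List.foldl_cons, List.drop_zero, Nat.sub_zero, List.take_zero]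
      cases keep
      · have := genB_shift kw false (hitsN kw rs) 0 (segs ++ [[]]) r rs
        simp only [genB, Nat.zero_add, Bool.false_eq_true, if_neg, not_false_iff] at this ⊢
        rw [this]
        have h2 := genB_acc kw false (hitsN kw rs) 0 (segs ++ [[]]) rs
        simp only [genB, Bool.false_eq_true, if_neg, not_false_iff] at h2 ⊢
        rw [h2]
        have h3 := ih ([] : List (List (List String)))
        simp only [genB, List.nil_append, Bool.false_eq_true, if_neg, not_false_iff] at h3
        rw [h3]
        simp
      · have := genB_head kw true (hitsN kw rs) (segs ++ [[]]) r rs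
        simp only [genB, if_pos] at this ⊢
        rw [this]
        have h3 := ih ([] : List (List (List String)))
        simp only [genB, List.nil_append, if_pos] at h3
        rw [h3]
        rw [genA_modifyHead kw true [r] rs]
        simp
theorem iterfold (kw : String) (keep : Bool) (rows : List (List String))
    (cur : List (List String)) (out : List (List (List String))) :
    (rows.foldl
      (fun (st : List (List String) × List (List (List String))) row =>
        if pvMatch kw row then ((if keep then [row] else []), st.2 ++ [st.1])
        else (st.1 ++ [row], st.2)) (cur, out)).2
      ++ [(rows.foldl
      (fun (st : List (List String) × List (List (List String))) row =>
        if pvMatch kw row then ((if keep then [row] else []), st.2 ++ [st.1])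
        else (st.1 ++ [row], st.2)) (cur, out)).1]
      = out ++ genA kw keep cur rows := by
  induction rows generalizing cur out with
  | nil => simp [genA]
  | cons r rs ih =>
    simp only [List.foldl_cons, genA]
    cases hm : pvMatch kw r
    · simp only [Bool.false_eq_true, if_neg, not_false_iff, ih]
    · simp only [if_pos, ih, genA_modifyHead kw keep (if keep then [r] else []) rs]
      simp

theorem itersplit_eq_genA (kw : String) (keep : Bool) (rows : List (List String)) :
    pvItersplit rows kw keep = genA kw keep [] rows := by
  have := iterfold kw keep rows [] []
  simpa [pvItersplit] using this

theorem segments_eq (kw : String) (keep : Bool)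
    (data : List (String × List (List String))) (segs : List (List (List String))) :
    data.foldl (fun segs p => pvSegsOf segs p.2 kw keep) segs
      = segs ++ data.flatMap (fun p => genA kw keep [] p.2) := by
  induction data generalizing segs with
  | nil => simp
  | cons d ds ih =>
    simp only [List.foldl_cons, List.flatMap_cons, ih]
    rw [segsOf_eq_genB, genB_eq_genA]
    simp

theorem splited_eq (kw : String) (keep : Bool)
    (data : List (String × List (List String))) :
    data.foldl (fun acc p => acc ++ pvTablesplit p.2 kw keep) []
      = (data.foldl (fun segs p => pvSegsOf segs p.2 kw keep) []).filter
          (fun s => !s.isEmpty) := by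
  rw [PySem.List.foldl_append_eq_flatMap, segments_eq]
  simp only [List.nil_append]
  induction data with
  | nil => simp
  | cons d ds ih =>
    simp only [List.flatMap_cons, List.filter_append, ih]
    congr 1
    rw [pvTablesplit, itersplit_eq_genA]

-- the numbered OrderedDict built from the same list, both ways
theorem dict_assembly (l : List (List (List String))) :
    ((PySem.List.pyRange 0 (PySem.List.len l) 1).foldl
        (fun (d : PySem.Dict String (List (List String))) t_i =>
          d.insert ("table_t" ++ PySem.Int.toStr (t_i + 1)) (PySem.List.pyGetD l t_i []))
        PySem.Dict.empty).items
      = (PySem.Dict.ofList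
          ((PySem.List.enumerate l).map
            (fun p => ("table_t" ++ PySem.Int.toStr (p.1 + 1), p.2)))).items := by
  have h := PySem.List.enumerate_eq_map_pyRange l ([] : List (List String))
  rw [h]
  simp only [PySem.Dict.ofList, PySem.Dict.update, List.foldl_map]

-- ===== VERDICT (by name: the statement is the Claim_ definition above) =====
theorem split_tables_spec : Claim_equal_split_tables := by
  intro data keyword keep_keyword _
  unfold Spec_split_tables split_tables split_tables_alt
  rw [splited_eq]
  exact dict_assembly _
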